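-- pv_equiv track=rewrite | github.com/Htyagi2003/Coding | tcs/tcs3.py | ps
-- ===== SOURCE A (Python) =====
-- from collections import defaultdict
--
-- def ps(N, start, connections):
--     ghou = defaultdict(list)
--     tfgf = defaultdict(int)
--
--     for i in range(N - 1):
--         c1, c2, g, tx = connections[i]
--         ghou[c1].append((-1 * g, tx, c2))
--         tfgf[c2] = tx
--
--     rtyu = []
--
--     def dfs(city):
--         rtyu.append(city)
--         for n in sorted(ghou[city]):
--             dfs(n[2])
--             rtyu.append(city)
--
--     dfs(start)
--
--     tfgfd = 0
--     for c in rtyu[1:]: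
--         tfgfd += tfgf[c]
--
--     return rtyu, tfgfd
-- ===== SOURCE B (Python) =====
-- def ps(N, start, connections):
--     m = max(N - 1, 0)
--     adj = {}
--     for c1, c2, g, tx in connections[:m]:
--         adj.setdefault(c1, []).append((-g, tx, c2))
--     tax = {}
--     for c1, c2, g, tx in connections[:m]:
--         tax[c2] = tx
--     rtyu = [start]
--     stack = [(start, sorted(adj.get(start, [])))]
--     while stack:
--         city, rem = stack[-1]
--         if rem:
--             child = rem[0][2]
--             stack[-1] = (city, rem[1:])
--             rtyu.append(child)
--             stack.append((child, sorted(adj.get(child, []))))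
--         else:
--             stack.pop()
--             if stack:
--                 rtyu.append(stack[-1][0])
--     total = sum(tax.get(c, 0) for c in rtyu[1:])
--     return rtyu, total
-- ===== Notes on version B (the rewrite author's own statement) =====
-- stated objective: alternative
-- what changed: The recursive Euler-tour DFS is replaced by an iterative while loop over an explicit stack of (city, remaining sorted children) frames that re-appends the parent on each return, and the single build loop indexed by range(N-1) becomes two plain loops over the slice connections[:max(N-1,0)].
import Mathlib
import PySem

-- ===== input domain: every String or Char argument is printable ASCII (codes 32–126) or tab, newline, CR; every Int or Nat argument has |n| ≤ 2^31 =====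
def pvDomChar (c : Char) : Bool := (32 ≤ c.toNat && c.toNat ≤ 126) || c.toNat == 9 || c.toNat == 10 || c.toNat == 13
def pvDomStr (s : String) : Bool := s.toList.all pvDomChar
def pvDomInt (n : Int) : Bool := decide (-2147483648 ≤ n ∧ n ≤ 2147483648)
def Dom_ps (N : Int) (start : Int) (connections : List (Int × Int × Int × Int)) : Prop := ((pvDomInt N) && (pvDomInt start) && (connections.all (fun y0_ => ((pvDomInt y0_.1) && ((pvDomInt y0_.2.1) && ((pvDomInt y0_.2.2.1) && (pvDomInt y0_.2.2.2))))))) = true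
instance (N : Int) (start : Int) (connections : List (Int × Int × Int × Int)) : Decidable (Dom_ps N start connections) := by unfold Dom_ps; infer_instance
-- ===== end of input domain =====

-- B replaces the recursive Euler-tour DFS by an explicit-stack loop (same sorted child order, same
-- tax summation); objective: alternative decomposition, not speed.

-- ===== PORT A =====
-- Python tuple comparison on the (-g, tx, c2) triples = lexicographic order on Int × Int × Int
def pvKey3 (t : Int × Int × Int) : Int ×ₗ (Int ×ₗ Int) := toLex (t.1, toLex (t.2.1, t.2.2))

-- sorted(ghou[city]) with the defaultdict's [] default (the defaultdict insertion this access
-- causes mutates only ghou itself, which is never read again — unobservable in the result)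
def pvChildren (adj : PySem.Dict Int (List (Int × Int × Int))) (city : Int) : List (Int × Int × Int) :=
  PySem.List.sorted (adj.getD city []) pvKey3 false

-- one iteration of A's build loop: ghou[c1].append((-1*g, tx, c2)); tfgf[c2] = tx
def pvStepA (d : PySem.Dict Int (List (Int × Int × Int)) × PySem.Dict Int Int)
    (e : Int × Int × Int × Int) : PySem.Dict Int (List (Int × Int × Int)) × PySem.Dict Int Int :=
  (d.1.modify e.1 [] (fun l => l ++ [(-1 * e.2.2.1, e.2.2.2, e.2.1)]), d.2.insert e.2.1 e.2.2.2)

-- A's recursive dfs; the fuel only totalizes it in Lean: Pre_ps rules out the inputs where the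
-- Python recursion never returns, and on every Pre_ps input this fuel is never exhausted
def pvDfsA (adj : PySem.Dict Int (List (Int × Int × Int))) : Nat → Int → List Int → List Int
  | 0, city, acc => acc ++ [city]
  | f + 1, city, acc =>
      (pvChildren adj city).foldl (fun a t => pvDfsA adj f t.2.2 a ++ [city]) (acc ++ [city])

def ps (N : Int) (start : Int) (connections : List (Int × Int × Int × Int)) : List Int × Int :=
  let st := (PySem.List.pyRange 0 (N - 1) 1).foldl
      (fun d i => pvStepA d (PySem.List.pyGetD connections i (0, 0, 0, 0)))
      (PySem.Dict.empty, PySem.Dict.empty)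
  let rtyu := pvDfsA st.1 (connections.length + 1) start []
  let tfgfd := (PySem.List.slice rtyu (some 1) none).foldl (fun s c => s + st.2.getD c 0) 0
  (rtyu, tfgfd)

-- ===== PORT B =====
-- the largest adjacency-list length; used only by the termination measure of the stack loop
def pvMaxLen (adj : PySem.Dict Int (List (Int × Int × Int))) : Nat :=
  adj.values.foldr (fun v m => max v.length m) 0

lemma pv_mem_le_foldr (v : List (Int × Int × Int)) :
    ∀ (l : List (List (Int × Int × Int))), v ∈ l → v.length ≤ l.foldr (fun w m => max w.length m) 0 := by
  intro l hl
  induction l with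
  | nil => cases hl
  | cons w t ih =>
    rcases List.mem_cons.mp hl with h | h
    · subst h; simp [List.foldr]
    · exact le_trans (ih h) (by simp [List.foldr])

-- cited by pvRunStack's decreasing_by
lemma pvMaxLen_bound (adj : PySem.Dict Int (List (Int × Int × Int))) (c : Int) :
    (pvChildren adj c).length ≤ pvMaxLen adj := by
  unfold pvChildren pvMaxLen
  rw [PySem.List.length_sorted]
  rw [PySem.Dict.getD_eq_get?_getD]
  cases h : adj.get? c with
  | none => simp
  | some v =>
    have hv : v ∈ adj.values := by
      have := PySem.Dict.mem_items_of_get?_eq_some adj h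
      exact List.mem_map.mpr ⟨(c, v), this, rfl⟩
    simpa using pv_mem_le_foldr v adj.values hv

def pvStackW (M : Nat) (st : List (Nat × Int × List (Int × Int × Int))) : Nat :=
  (st.map (fun fr => (2 * fr.2.2.length + 2) * (M + 2) ^ fr.1)).sum

-- 'if stack: rtyu.append(stack[-1][0])' after a pop
def pvFinish (rest : List (Nat × Int × List (Int × Int × Int))) (acc : List Int) : List Int :=
  match rest with
  | [] => acc
  | (_, p, _) :: _ => acc ++ [p]

-- B's while loop over the explicit stack of (city, remaining sorted children) frames; the
-- per-frame fuel component only totalizes the loop in Lean (never exhausted under Pre_ps,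
-- exactly like pvDfsA's fuel)
def pvRunStack (adj : PySem.Dict Int (List (Int × Int × Int))) :
    List (Nat × Int × List (Int × Int × Int)) → List Int → List Int
  | [], acc => acc
  | (_f, _, []) :: rest, acc => pvRunStack adj rest (pvFinish rest acc)
  | (0, city, c :: cs) :: rest, acc =>
      pvRunStack adj ((0, city, cs) :: rest) (acc ++ [c.2.2, city])
  | (g + 1, city, c :: cs) :: rest, acc =>
      pvRunStack adj ((g, c.2.2, pvChildren adj c.2.2) :: (g + 1, city, cs) :: rest) (acc ++ [c.2.2])
  termination_by st _ => pvStackW (pvMaxLen adj) st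
  decreasing_by
  · simp [pvStackW]
  · simp [pvStackW]
  · have hL := pvMaxLen_bound adj c.2.2
    have hP := pow_pos (show 0 < pvMaxLen adj + 2 by omega) g
    simp [pvStackW, pow_succ]
    nlinarith

def ps_alt (N : Int) (start : Int) (connections : List (Int × Int × Int × Int)) : List Int × Int :=
  let edges := PySem.List.slice connections none (some (max (N - 1) 0))
  let adj := edges.foldl
      (fun d e => d.modify e.1 [] (fun l => l ++ [(-1 * e.2.2.1, e.2.2.2, e.2.1)])) PySem.Dict.empty
  let tax := edges.foldl (fun d e => d.insert e.2.1 e.2.2.2) PySem.Dict.empty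
  let rtyu := pvRunStack adj [(connections.length, start, pvChildren adj start)] [start]
  let tfgfd := ((PySem.List.slice rtyu (some 1) none).map (fun c => tax.getD c 0)).sum
  (rtyu, tfgfd)

-- ===== PRECONDITION & SPEC =====
-- successors of u along the used directed edges, and one saturation step of reachability
def pvSuccs (es : List (Int × Int × Int × Int)) (u : Int) : List Int :=
  (es.filter (fun e => e.1 = u)).map (fun e => e.2.1)

def pvStep (es : List (Int × Int × Int × Int)) (S : List Int) : List Int :=
  PySem.Set.ofList (S ++ S.flatMap (pvSuccs es))

def pvReach (es : List (Int × Int × Int × Int)) (S0 : List Int) : List Int :=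
  (pvStep es)^[es.length + 1] S0

-- Pre_ps = exactly where the Python A returns: enough connections for range(N-1) (else IndexError),
-- and no directed cycle reachable from start among the used edges (else dfs recurses forever)
def Pre_ps (N : Int) (start : Int) (connections : List (Int × Int × Int × Int)) : Prop :=
  N - 1 ≤ (connections.length : Int) ∧
  (∀ u ∈ pvReach (connections.take (N - 1).toNat) [start],
      u ∉ pvReach (connections.take (N - 1).toNat) (pvSuccs (connections.take (N - 1).toNat) u))

instance (N : Int) (start : Int) (connections : List (Int × Int × Int × Int)) : Decidable (Pre_ps N start connections) := by unfold Pre_ps; infer_instance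

def pvWitness_ps : Int × Int × (List (Int × Int × Int × Int)) := (3, 1, [(1, 2, 5, 10), (1, 3, 2, 7)])

def Spec_ps (N : Int) (start : Int) (connections : List (Int × Int × Int × Int)) (out : List Int × Int) : Prop := out = ps_alt N start connections
instance (N : Int) (start : Int) (connections : List (Int × Int × Int × Int)) (out : List Int × Int) : Decidable (Spec_ps N start connections out) := by unfold Spec_ps; infer_instance

-- ===== CLAIM (what is proved, stated in full; the proofs are below) =====
def Claim_equal_ps : Prop := ∀ (N : Int) (start : Int) (connections : List (Int × Int × Int × Int)), Dom_ps N start connections → Pre_ps N start connections → Spec_ps N start connections (ps N start connections)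

-- ===== LEMMAS AND PROOFS =====

-- A's indexing loop over range(m) = a loop over the first m connections
lemma pv_foldl_range {β : Type} (xs : List (Int × Int × Int × Int))
    (f : β → (Int × Int × Int × Int) → β) :
    ∀ (m : Nat), m ≤ xs.length → ∀ (init : β),
      (PySem.List.pyRange 0 (m : Int) 1).foldl
          (fun acc j => f acc (PySem.List.pyGetD xs j (0, 0, 0, 0))) init
        = (xs.take m).foldl f init := by
  intro m
  induction m with
  | zero => intro _ init; rw [PySem.List.pyRange_one_eq_nil (by omega)]; simp
  | succ m ih =>
    intro hm init
    have hc : ((m + 1 : Nat) : Int) = (m : Int) + 1 := by push_cast; ring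
    rw [hc, PySem.List.pyRange_one_succ_right (by positivity), List.foldl_append,
      ih (by omega)]
    have hx : xs[m]? = some xs[m] := List.getElem?_eq_getElem (by omega)
    have ht : List.take (m + 1) xs = List.take m xs ++ [xs[m]] := by
      rw [List.take_add_one]; simp [hx]
    rw [ht, List.foldl_append]
    simp [PySem.List.pyGetD_natCast, List.getD, hx]

-- the stack machine run from one frame = the recursion on that frame, then the rest of the stack
lemma pv_run_sim (adj : PySem.Dict Int (List (Int × Int × Int))) (fuel : Nat) :
    ∀ (cs : List (Int × Int × Int)) (city : Int)
      (rest : List (Nat × Int × List (Int × Int × Int))) (acc : List Int),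
      pvRunStack adj ((fuel, city, cs) :: rest) acc
        = pvRunStack adj rest
            (pvFinish rest (cs.foldl (fun a t => pvDfsA adj fuel t.2.2 a ++ [city]) acc)) := by
  induction fuel with
  | zero =>
    intro cs city rest
    induction cs with
    | nil => intro acc; rw [pvRunStack]; rfl
    | cons c cs ih =>
      intro acc
      rw [pvRunStack, ih]
      simp [pvDfsA, List.foldl]
  | succ g ihf =>
    intro cs city rest
    induction cs with
    | nil => intro acc; rw [pvRunStack]; rfl
    | cons c cs ih =>
      intro acc
      rw [pvRunStack, ihf, ih]
      simp only [pvFinish, List.foldl]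
      rfl

-- ===== VERDICT (by name: the statement is the Claim_ definition above) =====
theorem ps_spec : Claim_equal_ps := by
  intro N start conns _ hpre
  unfold Spec_ps
  obtain ⟨h1, -⟩ := hpre
  simp only [ps, ps_alt]
  have hm : (N - 1).toNat ≤ conns.length := by omega
  have hrange : PySem.List.pyRange 0 (N - 1) 1 = PySem.List.pyRange 0 ((N - 1).toNat : Int) 1 := by
    rcases lt_or_ge (N - 1) 0 with h | h
    · rw [PySem.List.pyRange_one_eq_nil (by omega), PySem.List.pyRange_one_eq_nil (by omega)]
    · rw [Int.toNat_of_nonneg h]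
  have hslice : PySem.List.slice conns none (some (max (N - 1) 0)) = conns.take (N - 1).toNat := by
    have hmx : max (N - 1) 0 = (((N - 1).toNat : Nat) : Int) := by omega
    rw [hmx, PySem.List.slice_to_natCast]
  rw [hrange, hslice]
  rw [pv_foldl_range conns pvStepA ((N - 1).toNat) hm]
  rw [show pvStepA = (fun s e =>
        (PySem.Dict.modify s.1 e.1 [] (fun l => l ++ [(-1 * e.2.2.1, e.2.2.2, e.2.1)]),
         PySem.Dict.insert s.2 e.2.1 e.2.2.2)) from rfl]
  rw [PySem.List.foldl_prod_mk
      (fun (d : PySem.Dict Int (List (Int × Int × Int))) (e : Int × Int × Int × Int) =>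
        PySem.Dict.modify d e.1 [] (fun l => l ++ [(-1 * e.2.2.1, e.2.2.2, e.2.1)]))
      (fun (d : PySem.Dict Int Int) (e : Int × Int × Int × Int) => PySem.Dict.insert d e.2.1 e.2.2.2)
      (List.take (N - 1).toNat conns) PySem.Dict.empty PySem.Dict.empty]
  rw [pv_run_sim]
  rw [pvRunStack]
  simp [pvFinish, pvDfsA, PySem.List.foldl_add]
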